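-- pv_equiv track=rewrite | github.com/LinxunChen/asset_allocation_system | src/satellite_agent/notifier.py | _simplify_chain_summary
-- ===== SOURCE A (Python) =====
-- def _simplify_chain_summary(chain_summary: str) -> str:
--     steps = [step.strip() for step in (chain_summary or "").split("->") if step.strip()]
--     if not steps:
--         return "首次出现"
--     compressed: list[str] = []
--     for step in steps:
--         if not compressed or compressed[-1] != step:
--             compressed.append(step)
--     if len(compressed) <= 2:
--         return " -> ".join(compressed)
--     return f"{compressed[0]} -> {compressed[-1]}"
-- ===== SOURCE B (Python) =====
-- def _simplify_chain_summary(chain_summary: str) -> str: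
--     steps = [step.strip() for step in (chain_summary or "").split("->") if step.strip()]
--     if not steps:
--         return "首次出现"
--     first = steps[0]
--     if all(s == first for s in steps):
--         return first
--     return f"{first} -> {steps[-1]}"
-- ===== Notes on version B (the rewrite author's own statement) =====
-- stated objective: simpler
-- what changed: B drops the adjacent-dedup accumulation loop and the length-two join branch: it returns the single step when all parsed steps are equal, otherwise it joins the first and last parsed steps directly.
import Mathlib
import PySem

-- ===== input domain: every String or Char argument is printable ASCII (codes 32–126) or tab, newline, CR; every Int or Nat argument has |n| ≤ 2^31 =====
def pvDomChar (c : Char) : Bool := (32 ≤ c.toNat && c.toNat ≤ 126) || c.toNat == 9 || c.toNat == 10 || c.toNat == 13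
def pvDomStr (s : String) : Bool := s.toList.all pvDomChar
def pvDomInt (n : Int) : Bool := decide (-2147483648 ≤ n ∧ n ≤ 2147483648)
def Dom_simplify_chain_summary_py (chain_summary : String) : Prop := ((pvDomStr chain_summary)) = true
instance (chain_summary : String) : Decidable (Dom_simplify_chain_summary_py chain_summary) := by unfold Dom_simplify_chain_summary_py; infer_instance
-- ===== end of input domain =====

-- B drops A's adjacent-dedup accumulation loop and the length-two join branch: it returns the
-- single step when all parsed steps are equal, otherwise it joins the endpoints directly (simpler).


-- ===== PORT A =====
-- shared parsing of `steps` — the comprehension `[step.strip() for step in (chain_summary or "").split("->") if step.strip()]`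
-- ('chain_summary or ""' is the identity on strings; split? with the nonempty separator "->" is always `some`)
def pvSteps (s : String) : List String :=
  ((PySem.Str.split? s "->").getD []).filterMap (fun step =>
    let t := PySem.Str.strip step
    if t = "" then none else some t)

-- one iteration of A's dedup loop: `if not compressed or compressed[-1] != step: compressed.append(step)`
def pvDedupStep (c : List String) (step : String) : List String :=
  if c = [] ∨ c.getLast? ≠ some step then c ++ [step] else c

def simplify_chain_summary_py (chain_summary : String) : String :=
  let steps := pvSteps chain_summary
  if steps = [] then "首次出现"
  else
    let compressed := steps.foldl pvDedupStep []
    if compressed.length ≤ 2 then PySem.Str.join " -> " compressed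
    else (compressed.headD "") ++ " -> " ++ (compressed.getLastD "")

-- ===== PORT B =====
def simplify_chain_summary_py_alt (chain_summary : String) : String :=
  match pvSteps chain_summary with
  | [] => "首次出现"
  | first :: rest =>
    if (first :: rest).all (fun s => s = first) then first
    else first ++ " -> " ++ ((first :: rest).getLastD "")

-- ===== PRECONDITION & SPEC =====
def Spec_simplify_chain_summary_py (chain_summary : String) (out : String) : Prop := out = simplify_chain_summary_py_alt chain_summary
instance (chain_summary : String) (out : String) : Decidable (Spec_simplify_chain_summary_py chain_summary out) := by unfold Spec_simplify_chain_summary_py; infer_instance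

-- ===== CLAIM (what is proved, stated in full; the proofs are below) =====
def Claim_equal_simplify_chain_summary_py : Prop := ∀ (chain_summary : String), Dom_simplify_chain_summary_py chain_summary → Spec_simplify_chain_summary_py chain_summary (simplify_chain_summary_py chain_summary)

-- ===== LEMMAS AND PROOFS =====

theorem pvDedupStep_ne_nil (c : List String) (x : String) : pvDedupStep c x ≠ [] := by
  unfold pvDedupStep; split
  · simp
  · rename_i h
    push Not at h
    exact h.1

theorem pvDedupStep_getLast? (c : List String) (x : String) :
    (pvDedupStep c x).getLast? = some x := by
  unfold pvDedupStep; split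
  · simp
  · rename_i h
    push Not at h
    exact h.2

theorem pvDedupStep_head? (c : List String) (x : String) (hc : c ≠ []) :
    (pvDedupStep c x).head? = c.head? := by
  unfold pvDedupStep; split
  · cases c with
    | nil => exact absurd rfl hc
    | cons a t => simp
  · rfl

theorem pvDedupStep_len (c : List String) (x : String) :
    c.length ≤ (pvDedupStep c x).length := by
  unfold pvDedupStep; split <;> simp

theorem foldl_dedup_head? (rest : List String) (c : List String) (hc : c ≠ []) :
    (rest.foldl pvDedupStep c).head? = c.head? := by
  induction rest generalizing c with
  | nil => rfl
  | cons x xs ih =>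
    simp only [List.foldl_cons]
    rw [ih _ (pvDedupStep_ne_nil c x), pvDedupStep_head? c x hc]

theorem foldl_dedup_getLast? (rest : List String) (c : List String) (hc : c ≠ []) :
    (rest.foldl pvDedupStep c).getLast? = rest.getLast?.or c.getLast? := by
  induction rest generalizing c with
  | nil => rfl
  | cons x xs ih =>
    simp only [List.foldl_cons]
    rw [ih _ (pvDedupStep_ne_nil c x), pvDedupStep_getLast? c x]
    cases hxs : xs.getLast? with
    | none =>
      cases xs with
      | nil => simp
      | cons y ys => simp [List.getLast?_cons] at hxs
    | some y =>
      cases xs with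
      | nil => simp at hxs
      | cons z zs => simp_all [List.getLast?_cons]

theorem foldl_dedup_len (rest : List String) (c : List String) :
    c.length ≤ (rest.foldl pvDedupStep c).length := by
  induction rest generalizing c with
  | nil => exact le_rfl
  | cons x xs ih => exact le_trans (pvDedupStep_len c x) (ih _)

theorem foldl_dedup_all_eq (rest : List String) (s : String)
    (h : rest.all (fun x => x = s) = true) :
    rest.foldl pvDedupStep [s] = [s] := by
  induction rest with
  | nil => rfl
  | cons x xs ih =>
    simp only [List.all_cons, Bool.and_eq_true, decide_eq_true_eq] at h
    obtain ⟨hx, hxs⟩ := h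
    subst hx
    have hstep : pvDedupStep [x] x = [x] := by
      unfold pvDedupStep; simp
    simpa [hstep] using ih hxs

theorem foldl_dedup_not_all_eq (rest : List String) (s : String)
    (h : rest.all (fun x => x = s) = false) :
    2 ≤ (rest.foldl pvDedupStep [s]).length := by
  induction rest with
  | nil => simp at h
  | cons x xs ih =>
    simp only [List.all_cons, Bool.and_eq_false_iff, decide_eq_false_iff_not] at h
    by_cases hx : x = s
    · subst hx
      have hstep : pvDedupStep [x] x = [x] := by
        unfold pvDedupStep; simp
      have hxs : xs.all (fun y => y = x) = false := by
        rcases h with h | h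
        · exact absurd rfl h
        · exact h
      simpa [hstep] using ih hxs
    · have hstep : pvDedupStep [s] x = [s, x] := by
        unfold pvDedupStep
        have : ¬ (some s = some x) := by simp [Ne.symm hx]
        simp [this]
      calc (2 : ℕ) = ([s, x] : List String).length := by simp
        _ ≤ (xs.foldl pvDedupStep [s, x]).length := foldl_dedup_len xs [s, x]
        _ = ((x :: xs).foldl pvDedupStep [s]).length := by simp [hstep]

theorem pv_join_singleton (x : String) : PySem.Str.join " -> " [x] = x := by
  simp [PySem.Str.join, PySem.Chars.join, List.intercalate, String.ofList]

theorem pv_join_pair (a b : String) : PySem.Str.join " -> " [a, b] = a ++ " -> " ++ b := by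
  apply String.toList_injective
  simp [PySem.Str.join, PySem.Chars.join, List.intercalate]

-- ===== VERDICT (by name: the statement is the Claim_ definition above) =====
theorem simplify_chain_summary_py_spec : Claim_equal_simplify_chain_summary_py := by
  intro s _
  unfold Spec_simplify_chain_summary_py simplify_chain_summary_py simplify_chain_summary_py_alt
  cases hsteps : pvSteps s with
  | nil => simp
  | cons first rest =>
    have hne : (first :: rest : List String) ≠ [] := by simp
    have hinit : pvDedupStep [] first = [first] := by unfold pvDedupStep; simp
    have hfold : (first :: rest).foldl pvDedupStep [] = rest.foldl pvDedupStep [first] := by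
      simp [hinit]
    simp only [hne, ite_false, hfold]
    by_cases hall : rest.all (fun x => x = first) = true
    · -- all steps equal: compressed = [first], A joins the singleton, B returns first
      have hcomp := foldl_dedup_all_eq rest first hall
      have hallB : ((first :: rest).all fun s => s = first) = true := by
        simp [List.all_cons, hall]
      simp [hcomp, hallB, pv_join_singleton]
    · have hall' : rest.all (fun x => x = first) = false := by
        simpa using hall
      have hrest_ne : rest ≠ [] := by
        intro h; subst h; simp at hall'
      have hallB : ((first :: rest).all fun s => s = first) = false := by
        simp [List.all_cons, hall']
      have hlen := foldl_dedup_not_all_eq rest first hall'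
      have hhead : (rest.foldl pvDedupStep [first]).head? = some first := by
        rw [foldl_dedup_head? rest [first] (by simp)]; rfl
      obtain ⟨t, ht⟩ : ∃ t, rest.getLast? = some t := by
        cases hr : rest.getLast? with
        | none => exact absurd (List.getLast?_eq_none_iff.mp hr) hrest_ne
        | some t => exact ⟨t, rfl⟩
      have hlast : (rest.foldl pvDedupStep [first]).getLast? = some t := by
        rw [foldl_dedup_getLast? rest [first] (by simp), ht]; rfl
      have hlastB : ((first :: rest) : List String).getLastD "" = t := by
        have : ((first :: rest) : List String).getLast? = some t := by
          cases rest with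
          | nil => exact absurd rfl hrest_ne
          | cons z zs => rw [List.getLast?_cons_cons]; exact ht
        simp [List.getLastD_eq_getLast?, this]
      simp only [hallB, Bool.false_eq_true, ite_false, hlastB]
      by_cases h2 : (rest.foldl pvDedupStep [first]).length ≤ 2
      · -- compressed has exactly two elements [first, t]; the join is "first -> t"
        have hlen2 : (rest.foldl pvDedupStep [first]).length = 2 := le_antisymm h2 hlen
        obtain ⟨a, b, hab⟩ : ∃ a b, rest.foldl pvDedupStep [first] = [a, b] := by
          cases hc : rest.foldl pvDedupStep [first] with
          | nil => simp [hc] at hlen2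
          | cons a tl =>
            cases tl with
            | nil => simp [hc] at hlen2
            | cons b tl2 =>
              cases tl2 with
              | nil => exact ⟨a, b, rfl⟩
              | cons d tl3 => simp [hc] at hlen2
        rw [hab] at hhead hlast ⊢
        simp only [List.head?_cons, Option.some.injEq] at hhead
        have hbt : b = t := by simpa [List.getLast?_cons] using hlast
        subst hhead; subst hbt
        simp [pv_join_pair]
      · -- compressed has ≥ 3 elements; A's f-string equals "first -> t" too
        simp only [h2, ite_false]
        have hheadD : (rest.foldl pvDedupStep [first]).headD "" = first := by
          simp [hhead]
        have hlastD : (rest.foldl pvDedupStep [first]).getLastD "" = t := by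
          simp [List.getLastD_eq_getLast?, hlast]
        rw [hheadD, hlastD]
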